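-- pv_equiv track=rewrite | github.com/daily-boj/x86chi | problems/P1365.py | solution
-- ===== SOURCE A (Python) =====
-- from typing import List
--
-- def solution(wires: List[int]):
--     table = [-1]
--     for wire in wires:
--         if wire > table[len(table)-1]:
--             table.append(wire)
--         else:
--             table[lowerBound(table, wire)] = wire
--     return len(wires) - len(table) + 1
--
-- def lowerBound(table: List[int], k: int):
--     low = 0
--     high = len(table) - 1
--
--     while low < high:
--         mid = (low + high) // 2
--         if table[mid] >= k:
--             high = mid
--         else:
--             low = mid + 1
--     return high
-- ===== SOURCE B (Python) =====
-- from typing import List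
--
-- def solution(wires: List[int]):
--     # Classic O(n^2) LIS DP over the sentinel-prefixed sequence [-1] + wires
--     # (the sentinel is part of A's visible semantics: its table starts at [-1]).
--     dp = []      # (value, length of longest strictly increasing run ending at it)
--     lis = 0
--     for x in [-1] + wires:
--         best = 0
--         for v, l in dp:
--             if v < x and l > best:
--                 best = l
--         dp.append((x, best + 1))
--         if best + 1 > lis:
--             lis = best + 1
--     return len(wires) - lis + 1
-- ===== Notes on version B (the rewrite author's own statement) =====
-- stated objective: simpler
-- what changed: Replaces A's patience-sorting tails table with hand-written binary search by the classic O(n^2) LIS dynamic program (one pass appending (value, best-chain-length) pairs with a running maximum) over the same sentinel-prefixed sequence.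
import Mathlib
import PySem

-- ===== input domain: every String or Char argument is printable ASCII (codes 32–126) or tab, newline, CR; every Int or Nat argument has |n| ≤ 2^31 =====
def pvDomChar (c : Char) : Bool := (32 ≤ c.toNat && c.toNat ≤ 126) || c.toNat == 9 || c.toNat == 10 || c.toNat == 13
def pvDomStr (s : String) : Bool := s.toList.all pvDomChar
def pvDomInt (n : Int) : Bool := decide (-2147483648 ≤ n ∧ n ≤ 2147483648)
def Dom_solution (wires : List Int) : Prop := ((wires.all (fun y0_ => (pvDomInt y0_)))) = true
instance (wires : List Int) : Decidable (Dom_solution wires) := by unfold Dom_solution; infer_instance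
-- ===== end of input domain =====

-- B replaces A's patience-sorting tails table with binary search by the classic O(n^2)
-- LIS dynamic program over the same sentinel-prefixed sequence (objective: simpler).

-- ===== PORT A =====
-- A's while-loop binary search; all indices it touches are in range (0 ≤ mid < table.length),
-- so `getD _ 0` is exact for Python's `table[mid]`.
def lowerBoundAux (table : List Int) (k : Int) (low high : Nat) : Nat :=
  if low < high then
    let mid := (low + high) / 2
    if table.getD mid 0 ≥ k then lowerBoundAux table k low mid
    else lowerBoundAux table k (mid + 1) high
  else high
termination_by high - low
decreasing_by all_goals omega

def lowerBound (table : List Int) (k : Int) : Nat :=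
  lowerBoundAux table k 0 (table.length - 1)

-- body of A's `for wire in wires` loop; table is always nonempty and the set index in range
def stepA (table : List Int) (wire : Int) : List Int :=
  if wire > table.getD (table.length - 1) 0 then table ++ [wire]
  else table.set (lowerBound table wire) wire

def solution (wires : List Int) : Int :=
  (wires.length : Int) - ((wires.foldl stepA [-1]).length : Int) + 1

-- ===== PORT B =====
-- inner `for v, l in dp` loop of Source B
def bestOf (dp : List (Int × Int)) (x : Int) : Int :=
  dp.foldl (fun best p => if p.1 < x ∧ p.2 > best then p.2 else best) 0

-- body of Source B's outer loop: state = (dp pairs, running max `lis`)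
def stepB (st : List (Int × Int) × Int) (x : Int) : List (Int × Int) × Int :=
  let best := bestOf st.1 x
  (st.1 ++ [(x, best + 1)], if best + 1 > st.2 then best + 1 else st.2)

def solution_alt (wires : List Int) : Int :=
  (wires.length : Int) - (((-1 :: wires).foldl stepB ([], 0)).2) + 1

-- ===== PRECONDITION & SPEC =====
def Spec_solution (wires : List Int) (out : Int) : Prop := out = solution_alt wires
instance (wires : List Int) (out : Int) : Decidable (Spec_solution wires out) := by unfold Spec_solution; infer_instance

-- ===== CLAIM (what is proved, stated in full; the proofs are below) =====
def Claim_equal_solution : Prop := ∀ (wires : List Int), Dom_solution wires → Spec_solution wires (solution wires)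

-- ===== LEMMAS AND PROOFS =====

-- Invariant tying A's patience table `t` to B's DP state `(d, lis)`:
-- t is nonempty and strictly increasing; lis = |t|; each t[j] is the value of some DP pair
-- of chain-length j+1; and every DP pair (v, l) has 1 ≤ l ≤ |t| and t[l-1] ≤ v.
def LInv (t : List Int) (d : List (Int × Int)) (lis : Int) : Prop :=
  t ≠ [] ∧
  (∀ i j, (hi : i < t.length) → (hj : j < t.length) → i < j → t[i] < t[j]) ∧
  lis = (t.length : Int) ∧
  (∀ j, (hj : j < t.length) → ∃ p ∈ d, p.1 = t[j] ∧ p.2 = (j : Int) + 1) ∧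
  (∀ p ∈ d, 1 ≤ p.2 ∧ p.2 ≤ (t.length : Int) ∧ t.getD (p.2 - 1).toNat 0 ≤ p.1)

theorem best_foldl_ge (x : Int) (d : List (Int × Int)) (acc : Int) :
    acc ≤ d.foldl (fun best p => if p.1 < x ∧ p.2 > best then p.2 else best) acc := by
  induction d generalizing acc with
  | nil => simp
  | cons p d ih =>
      simp only [List.foldl_cons]
      split_ifs with hcond
      · exact le_trans (le_of_lt hcond.2) (ih p.2)
      · exact ih acc

theorem best_foldl_le (x m : Int) (d : List (Int × Int)) : ∀ (acc : Int),
    (∀ p ∈ d, p.1 < x → p.2 ≤ m) → acc ≤ m →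
    d.foldl (fun best p => if p.1 < x ∧ p.2 > best then p.2 else best) acc ≤ m := by
  induction d with
  | nil => intro acc _ hacc; simpa
  | cons p d ih =>
      intro acc h hacc
      simp only [List.foldl_cons]
      split_ifs with hcond
      · exact ih _ (fun q hq => h q (List.mem_cons_of_mem _ hq)) (h p (List.mem_cons_self) hcond.1)
      · exact ih _ (fun q hq => h q (List.mem_cons_of_mem _ hq)) hacc

theorem best_foldl_lb (x : Int) (d : List (Int × Int)) (p : Int × Int)
    (hp : p ∈ d) (h1 : p.1 < x) : ∀ (acc : Int),
    p.2 ≤ d.foldl (fun best p => if p.1 < x ∧ p.2 > best then p.2 else best) acc := by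
  induction d with
  | nil => cases hp
  | cons q d ih =>
      intro acc
      simp only [List.foldl_cons]
      rcases List.mem_cons.mp hp with rfl | hmem
      · split_ifs with hcond
        · exact best_foldl_ge x d p.2
        · have : p.2 ≤ acc := by
            by_contra hlt
            exact hcond ⟨h1, by omega⟩
          exact le_trans this (best_foldl_ge x d acc)
      · exact ih hmem _

theorem lowerBoundAux_spec (t : List Int) (k : Int)
    (hmono : ∀ i j, (hi : i < t.length) → (hj : j < t.length) → i ≤ j → t[i] ≤ t[j])
    (low high : Nat) (hh : high < t.length) (hlh : low ≤ high)
    (hk : k ≤ t.getD high 0)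
    (hbelow : ∀ j, j < low → (hj : j < t.length) → t[j] < k) :
    low ≤ lowerBoundAux t k low high ∧ lowerBoundAux t k low high ≤ high ∧
      k ≤ t.getD (lowerBoundAux t k low high) 0 ∧
      (∀ j, j < lowerBoundAux t k low high → (hj : j < t.length) → t[j] < k) := by
  rw [lowerBoundAux]
  by_cases h : low < high
  · simp only [if_pos h]
    by_cases h2 : t.getD ((low + high) / 2) 0 ≥ k
    · simp only [if_pos h2]
      have := lowerBoundAux_spec t k hmono low ((low + high) / 2) (by omega) (by omega) h2 hbelow
      exact ⟨this.1, by omega, this.2.2⟩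
    · simp only [if_neg h2]
      have hmlt : (low + high) / 2 < t.length := by omega
      have hmid : t[(low + high) / 2] < k := by
        have := List.getD_eq_getElem t 0 hmlt
        omega
      have := lowerBoundAux_spec t k hmono ((low + high) / 2 + 1) high hh (by omega) hk
        (fun j hj hjlen => lt_of_le_of_lt (hmono j ((low + high) / 2) hjlen hmlt (by omega)) hmid)
      exact ⟨by omega, this.2⟩
  · simp only [if_neg h]
    have : low = high := by omega
    subst this
    exact ⟨le_refl _, le_refl _, hk, hbelow⟩
termination_by high - low
decreasing_by all_goals omega

theorem step_inv (t : List Int) (d : List (Int × Int)) (lis x : Int) (h : LInv t d lis) :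
    LInv (stepA t x) (stepB (d, lis) x).1 (stepB (d, lis) x).2 := by
  obtain ⟨hne, hpw, hlis, hc, hd⟩ := h
  have hn : 0 < t.length := List.length_pos_iff.mpr hne
  have hgetD : ∀ i, (hi : i < t.length) → t.getD i 0 = t[i] :=
    fun i hi => List.getD_eq_getElem t 0 hi
  have hmono : ∀ i j, (hi : i < t.length) → (hj : j < t.length) → i ≤ j → t[i] ≤ t[j] := by
    intro i j hi hj hij
    rcases Nat.lt_or_ge i j with hlt | hge
    · exact le_of_lt (hpw i j hi hj hlt)
    · have : i = j := by omega
      subst this; exact le_refl _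
  unfold stepA stepB
  by_cases hx : x > t.getD (t.length - 1) 0
  · -- append case
    have htl : t[t.length - 1] < x := by rw [← hgetD _ (by omega)]; exact hx
    have hb : bestOf d x = (t.length : Int) := by
      apply le_antisymm
      · exact best_foldl_le x _ d 0 (fun p hp _ => (hd p hp).2.1) (by positivity)
      · obtain ⟨p, hp, hp1, hp2⟩ := hc (t.length - 1) (by omega)
        have hlt : p.1 < x := by rw [hp1]; exact htl
        have := best_foldl_lb x d p hp hlt 0
        have hcast : ((t.length - 1 : Nat) : Int) + 1 = (t.length : Int) := by omega
        rw [hp2, hcast] at this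
        exact this
    simp only [if_pos hx, hb]
    have hgt : (t.length : Int) + 1 > lis := by omega
    simp only [if_pos hgt]
    refine ⟨by simp, ?_, ?_, ?_, ?_⟩
    · intro i j hi hj hij
      simp only [List.length_append, List.length_singleton] at hi hj
      by_cases hjn : j < t.length
      · rw [List.getElem_append_left (by omega), List.getElem_append_left hjn]
        exact hpw i j (by omega) hjn hij
      · have hj' : j = t.length := by omega
        subst hj'
        rw [List.getElem_append_left (by omega), List.getElem_append_right (le_refl _)]
        simp only [Nat.sub_self, List.getElem_singleton]
        exact lt_of_le_of_lt (hmono i (t.length - 1) (by omega) (by omega) (by omega)) htl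
    · simp only [List.length_append, List.length_singleton]; push_cast; ring
    · intro j hj
      simp only [List.length_append, List.length_singleton] at hj
      by_cases hjn : j < t.length
      · obtain ⟨p, hp, hp1, hp2⟩ := hc j hjn
        exact ⟨p, List.mem_append_left _ hp, by rw [List.getElem_append_left hjn]; exact hp1, hp2⟩
      · have hj' : j = t.length := by omega
        subst hj'
        refine ⟨(x, (t.length : Int) + 1), List.mem_append_right _ (by simp), ?_, by push_cast; ring⟩
        rw [List.getElem_append_right (le_refl _)]
        simp
    · intro p hp
      rcases List.mem_append.mp hp with hmem | hmem
      · obtain ⟨h1, h2, h3⟩ := hd p hmem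
        refine ⟨h1, by simp; omega, ?_⟩
        have hidx : (p.2 - 1).toNat < t.length := by omega
        rw [List.getD_eq_getElem _ 0 (by simp; omega), List.getElem_append_left hidx,
          ← List.getD_eq_getElem t 0 hidx]
        exact h3
      · simp only [List.mem_singleton] at hmem
        subst hmem
        refine ⟨by omega, by simp, ?_⟩
        have hidx : (((t.length : Int) + 1 - 1)).toNat = t.length := by omega
        simp only [hidx]
        rw [List.getD_eq_getElem _ 0 (by simp), List.getElem_append_right (le_refl _)]
        simp
  · -- replace case
    have hxle : x ≤ t.getD (t.length - 1) 0 := by omega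
    have hspec := lowerBoundAux_spec t x hmono 0 (t.length - 1) (by omega) (by omega) hxle
      (by omega)
    set hidx := lowerBoundAux t x 0 (t.length - 1) with hhdef
    obtain ⟨-, hhi, hgeq, hbel⟩ := hspec
    have hhn : hidx < t.length := by omega
    have hxh : x ≤ t[hidx] := by rw [← hgetD _ hhn]; exact hgeq
    have hb : bestOf d x = (hidx : Int) := by
      apply le_antisymm
      · refine best_foldl_le x _ d 0 ?_ (by positivity)
        intro p hp hpx
        by_contra hgt
        obtain ⟨h1, h2, h3⟩ := hd p hp
        have hi1 : hidx ≤ (p.2 - 1).toNat := by omega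
        have hi2 : (p.2 - 1).toNat < t.length := by omega
        have := hmono hidx (p.2 - 1).toNat hhn hi2 hi1
        rw [List.getD_eq_getElem t 0 hi2] at h3
        omega
      · rcases Nat.eq_zero_or_pos hidx with hz | hpos
        · rw [hz]; exact_mod_cast best_foldl_ge x d 0
        · obtain ⟨p, hp, hp1, hp2⟩ := hc (hidx - 1) (by omega)
          have hlt : p.1 < x := by rw [hp1]; exact hbel _ (by omega) (by omega)
          have := best_foldl_lb x d p hp hlt 0
          have hcast : ((hidx - 1 : Nat) : Int) + 1 = (hidx : Int) := by omega
          rw [hp2, hcast] at this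
          exact this
    have hlb : lowerBound t x = hidx := by rw [lowerBound, hhdef]
    simp only [if_neg hx, hb, hlb]
    have hngt : ¬ ((hidx : Int) + 1 > lis) := by omega
    simp only [if_neg hngt]
    have hlen : (t.set hidx x).length = t.length := List.length_set ..
    have hget : ∀ j, (hj : j < t.length) → (t.set hidx x)[j]'(by omega) = if hidx = j then x else t[j] :=
      fun j hj => by rw [List.getElem_set]
    refine ⟨by intro hcon; rw [← List.length_eq_zero_iff, hlen] at hcon; omega, ?_, by omega, ?_, ?_⟩
    · intro i j hi hj hij
      rw [hlen] at hi hj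
      rw [hget i hi, hget j hj]
      split_ifs with hih hjh hjh
      · omega
      · subst hih; exact lt_of_le_of_lt hxh (hpw hidx j hhn hj hij)
      · subst hjh; exact hbel i hij hi
      · exact hpw i j hi hj hij
    · intro j hj
      rw [hlen] at hj
      by_cases hjh : j = hidx
      · refine ⟨(x, (hidx : Int) + 1), List.mem_append_right _ (by simp), ?_, by rw [hjh]⟩
        rw [hget j hj, if_pos hjh.symm]
      · obtain ⟨p, hp, hp1, hp2⟩ := hc j hj
        refine ⟨p, List.mem_append_left _ hp, ?_, hp2⟩
        rw [hget j hj, if_neg (by omega)]; exact hp1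
    · intro p hp
      have hptwise : ∀ i, (hi : i < t.length) → (t.set hidx x).getD i 0 ≤ t[i] := by
        intro i hi
        rw [List.getD_eq_getElem _ 0 (by omega), hget i hi]
        split_ifs with hih
        · subst hih; exact hxh
        · exact le_refl _
      rcases List.mem_append.mp hp with hmem | hmem
      · obtain ⟨h1, h2, h3⟩ := hd p hmem
        refine ⟨h1, by omega, ?_⟩
        have hi2 : (p.2 - 1).toNat < t.length := by omega
        refine le_trans (hptwise _ hi2) ?_
        rw [← List.getD_eq_getElem t 0 hi2]
        exact h3
      · simp only [List.mem_singleton] at hmem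
        subst hmem
        refine ⟨by omega, by omega, ?_⟩
        have hi : ((hidx : Int) + 1 - 1).toNat = hidx := by omega
        rw [hi, List.getD_eq_getElem _ 0 (by omega), hget hidx hhn, if_pos rfl]

theorem fold_inv (ws : List Int) : ∀ (t : List Int) (d : List (Int × Int)) (lis : Int),
    LInv t d lis → LInv (ws.foldl stepA t) (ws.foldl stepB (d, lis)).1 (ws.foldl stepB (d, lis)).2 := by
  induction ws with
  | nil => intro t d lis h; exact h
  | cons w ws ih =>
      intro t d lis h
      simp only [List.foldl_cons]
      have hstep := step_inv t d lis w h
      have heta : stepB (d, lis) w = ((stepB (d, lis) w).1, (stepB (d, lis) w).2) := rfl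
      rw [heta]
      exact ih _ _ _ hstep

theorem inv_init : LInv [-1] [((-1 : Int), 1)] 1 := by
  refine ⟨by simp, ?_, by simp, ?_, ?_⟩
  · intro i j hi hj hij; simp at hi hj; omega
  · intro j hj
    simp only [List.length_singleton] at hj
    have : j = 0 := by omega
    subst this
    exact ⟨((-1 : Int), 1), by simp, by simp, by simp⟩
  · intro p hp
    simp only [List.mem_singleton] at hp
    subst hp
    simp

-- ===== VERDICT (by name: the statement is the Claim_ definition above) =====
theorem solution_spec : Claim_equal_solution := by
  intro wires _
  unfold Spec_solution solution solution_alt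
  have h1 : (-1 :: wires).foldl stepB ([], 0) = wires.foldl stepB ([((-1 : Int), 1)], 1) := by
    simp only [List.foldl_cons]
    norm_num [stepB, bestOf]
  rw [h1]
  obtain ⟨-, -, hlen, -, -⟩ := fold_inv wires [-1] [((-1 : Int), 1)] 1 inv_init
  rw [hlen]
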